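-- pv_equiv track=rewrite | github.com/domfahey/pdfviewer | scripts/test_report_generator.py | categorize_tests
-- ===== SOURCE A (Python) =====
-- from typing import Dict, List, Optional, Any
--
-- def categorize_tests(results: Dict[str, Any]) -> Dict[str, int]:
--     """Categorize tests by type based on naming conventions."""
--     categories = {
--         "unit": 0,
--         "integration": 0,
--         "api": 0,
--         "performance": 0,
--         "e2e": 0
--     }
--
--     test_cases = results.get("junit", {}).get("test_cases", [])
--     for test_case in test_cases:
--         name = test_case.get("name", "").lower()
--         classname = test_case.get("classname", "").lower()
--
--         if "integration" in name or "integration" in classname: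
--             categories["integration"] += 1
--         elif "api" in name or "api" in classname:
--             categories["api"] += 1
--         elif "performance" in name or "benchmark" in name:
--             categories["performance"] += 1
--         elif "e2e" in name or "end_to_end" in name:
--             categories["e2e"] += 1
--         else:
--             categories["unit"] += 1
--
--     return categories
-- ===== SOURCE B (Python) =====
-- def _sieve(pred, tests):
--     """Split tests into (count matching pred, remaining non-matching)."""
--     matched = [t for t in tests if pred(t)]
--     rest = [t for t in tests if not pred(t)]
--     return len(matched), rest
--
-- def categorize_tests(results):
--     """Categorize tests by successive sieving passes instead of a per-test branch chain."""
--     cases = results.get("junit", {}).get("test_cases", [])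
--     pairs = [(tc.get("name", "").lower(), tc.get("classname", "").lower()) for tc in cases]
--     n_int, rest = _sieve(lambda t: "integration" in t[0] or "integration" in t[1], pairs)
--     n_api, rest = _sieve(lambda t: "api" in t[0] or "api" in t[1], rest)
--     n_perf, rest = _sieve(lambda t: "performance" in t[0] or "benchmark" in t[0], rest)
--     n_e2e, rest = _sieve(lambda t: "e2e" in t[0] or "end_to_end" in t[0], rest)
--     return {
--         "unit": len(rest),
--         "integration": n_int,
--         "api": n_api,
--         "performance": n_perf,
--         "e2e": n_e2e,
--     }
-- ===== Notes on version B (the rewrite author's own statement) =====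
-- stated objective: alternative
-- what changed: Replaces the single pass with a per-test if/elif priority chain by staged sieving: the test list is lowered once to (name, classname) pairs, then each category in priority order filters off its matches from the shrinking remainder, and the leftover count is 'unit'.
import Mathlib
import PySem

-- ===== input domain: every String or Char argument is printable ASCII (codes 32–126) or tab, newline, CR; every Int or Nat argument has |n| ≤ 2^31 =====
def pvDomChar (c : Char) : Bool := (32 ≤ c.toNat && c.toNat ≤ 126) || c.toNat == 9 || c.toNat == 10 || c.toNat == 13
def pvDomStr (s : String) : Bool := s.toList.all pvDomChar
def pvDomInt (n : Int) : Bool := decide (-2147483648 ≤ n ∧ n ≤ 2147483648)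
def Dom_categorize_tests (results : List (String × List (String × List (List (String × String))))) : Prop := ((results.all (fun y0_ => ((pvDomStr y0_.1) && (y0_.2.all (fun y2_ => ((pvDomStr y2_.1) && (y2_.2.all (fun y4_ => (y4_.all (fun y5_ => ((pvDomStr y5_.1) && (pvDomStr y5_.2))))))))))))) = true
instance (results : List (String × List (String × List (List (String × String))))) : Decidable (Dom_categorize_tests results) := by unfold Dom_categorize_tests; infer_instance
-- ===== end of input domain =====

-- B replaces A's single pass with a per-test if/elif priority chain by staged sieving
-- passes: each category filters its matches off a shrinking remainder list (objective: alternative).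
-- ===== PORT A =====
def categorize_tests (results : List (String × List (String × List (List (String × String))))) : List (String × Int) :=
  let categories : PySem.Dict String Int :=
    PySem.Dict.ofList [("unit", 0), ("integration", 0), ("api", 0), ("performance", 0), ("e2e", 0)]
  let test_cases :=
    PySem.Dict.getD (PySem.Dict.ofList ((PySem.Dict.ofList results).getD "junit" [])) "test_cases" []
  let categories := test_cases.foldl (fun cats test_case =>
    let name := PySem.Str.lower ((PySem.Dict.ofList test_case).getD "name" "")
    let classname := PySem.Str.lower ((PySem.Dict.ofList test_case).getD "classname" "")
    if PySem.Str.isIn "integration" name || PySem.Str.isIn "integration" classname then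
      cats.modify "integration" 0 (· + 1)
    else if PySem.Str.isIn "api" name || PySem.Str.isIn "api" classname then
      cats.modify "api" 0 (· + 1)
    else if PySem.Str.isIn "performance" name || PySem.Str.isIn "benchmark" name then
      cats.modify "performance" 0 (· + 1)
    else if PySem.Str.isIn "e2e" name || PySem.Str.isIn "end_to_end" name then
      cats.modify "e2e" 0 (· + 1)
    else
      cats.modify "unit" 0 (· + 1)) categories
  categories.items

-- ===== PORT B =====
-- _sieve: (count of tests matching pred, remaining non-matching tests)
def pvSieve (pred : String × String → Bool) (tests : List (String × String)) :
    Int × List (String × String) :=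
  (((tests.filter pred).length : Int), tests.filter (fun t => !(pred t)))

def categorize_tests_alt (results : List (String × List (String × List (List (String × String))))) : List (String × Int) :=
  let cases :=
    PySem.Dict.getD (PySem.Dict.ofList ((PySem.Dict.ofList results).getD "junit" [])) "test_cases" []
  let pairs := cases.map (fun tc =>
    (PySem.Str.lower ((PySem.Dict.ofList tc).getD "name" ""),
     PySem.Str.lower ((PySem.Dict.ofList tc).getD "classname" "")))
  let s1 := pvSieve (fun t => PySem.Str.isIn "integration" t.1 || PySem.Str.isIn "integration" t.2) pairs
  let s2 := pvSieve (fun t => PySem.Str.isIn "api" t.1 || PySem.Str.isIn "api" t.2) s1.2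
  let s3 := pvSieve (fun t => PySem.Str.isIn "performance" t.1 || PySem.Str.isIn "benchmark" t.1) s2.2
  let s4 := pvSieve (fun t => PySem.Str.isIn "e2e" t.1 || PySem.Str.isIn "end_to_end" t.1) s3.2
  [("unit", (s4.2.length : Int)), ("integration", s1.1), ("api", s2.1),
   ("performance", s3.1), ("e2e", s4.1)]

-- ===== PRECONDITION & SPEC =====
def Spec_categorize_tests (results : List (String × List (String × List (List (String × String))))) (out : List (String × Int)) : Prop := out = categorize_tests_alt results
instance (results : List (String × List (String × List (List (String × String))))) (out : List (String × Int)) : Decidable (Spec_categorize_tests results out) := by unfold Spec_categorize_tests; infer_instance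

-- ===== CLAIM (what is proved, stated in full; the proofs are below) =====
def Claim_equal_categorize_tests : Prop := ∀ (results : List (String × List (String × List (List (String × String))))), Dom_categorize_tests results → Spec_categorize_tests results (categorize_tests results)

-- ===== LEMMAS AND PROOFS =====

-- The four category predicates over a lowered (name, classname) pair.
def pvPInt (t : String × String) : Bool :=
  PySem.Str.isIn "integration" t.1 || PySem.Str.isIn "integration" t.2
def pvPApi (t : String × String) : Bool :=
  PySem.Str.isIn "api" t.1 || PySem.Str.isIn "api" t.2
def pvPPerf (t : String × String) : Bool :=
  PySem.Str.isIn "performance" t.1 || PySem.Str.isIn "benchmark" t.1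
def pvPE2e (t : String × String) : Bool :=
  PySem.Str.isIn "e2e" t.1 || PySem.Str.isIn "end_to_end" t.1

-- A's loop step, expressed over the lowered pair.
def pvStep (cats : PySem.Dict String Int) (t : String × String) : PySem.Dict String Int :=
  if pvPInt t then cats.modify "integration" 0 (· + 1)
  else if pvPApi t then cats.modify "api" 0 (· + 1)
  else if pvPPerf t then cats.modify "performance" 0 (· + 1)
  else if pvPE2e t then cats.modify "e2e" 0 (· + 1)
  else cats.modify "unit" 0 (· + 1)

-- Priority-resolved predicates (first match wins).
def pvCApi (t : String × String) : Bool := !pvPInt t && pvPApi t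
def pvCPerf (t : String × String) : Bool := !pvPInt t && !pvPApi t && pvPPerf t
def pvCE2e (t : String × String) : Bool := !pvPInt t && !pvPApi t && !pvPPerf t && pvPE2e t
def pvCUnit (t : String × String) : Bool := !pvPInt t && !pvPApi t && !pvPPerf t && !pvPE2e t

-- A's fold over the literal 5-key dict, characterised by priority-resolved counts.
theorem pvFoldA (xs : List (String × String)) (u i a p e : Int) :
    xs.foldl pvStep (PySem.Dict.ofList
      [("unit", u), ("integration", i), ("api", a), ("performance", p), ("e2e", e)]) =
    PySem.Dict.ofList
      [("unit", u + (xs.countP pvCUnit : Int)),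
       ("integration", i + (xs.countP pvPInt : Int)),
       ("api", a + (xs.countP pvCApi : Int)),
       ("performance", p + (xs.countP pvCPerf : Int)),
       ("e2e", e + (xs.countP pvCE2e : Int))] := by
  induction xs generalizing u i a p e with
  | nil => simp [List.countP]
  | cons hd tl ih =>
    have hstep : pvStep (PySem.Dict.ofList
        [("unit", u), ("integration", i), ("api", a), ("performance", p), ("e2e", e)]) hd =
      PySem.Dict.ofList
        [("unit", u + if pvCUnit hd then 1 else 0),
         ("integration", i + if pvPInt hd then 1 else 0),
         ("api", a + if pvCApi hd then 1 else 0),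
         ("performance", p + if pvCPerf hd then 1 else 0),
         ("e2e", e + if pvCE2e hd then 1 else 0)] := by
      unfold pvStep pvCUnit pvCApi pvCPerf pvCE2e
      cases h1 : pvPInt hd <;> cases h2 : pvPApi hd <;> cases h3 : pvPPerf hd <;>
        cases h4 : pvPE2e hd <;>
        simp [PySem.Dict.ofList, PySem.Dict.modify, PySem.Dict.insert, PySem.Dict.get?,
          PySem.Dict.getD, PySem.Dict.contains, PySem.Dict.empty, PySem.Dict.update,
          PySem.Dict.items, List.find?]
    rw [List.foldl_cons, hstep, ih]
    have cnt : ∀ (q : (String × String) → Bool),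
        (((hd :: tl).countP q : Nat) : Int) =
        (if q hd then (1 : Int) else 0) + (tl.countP q : Int) := by
      intro q; cases h : q hd <;> simp [List.countP_cons, h] <;> push_cast <;> ring
    simp only [cnt]
    congr 1
    ring_nf

-- countP through one filter stage.
theorem pvCountFilter (q r : (String × String) → Bool) (xs : List (String × String)) :
    ((xs.filter r).countP q) = xs.countP (fun t => r t && q t) := by
  induction xs with
  | nil => rfl
  | cons hd tl ih =>
    cases hr : r hd <;> cases hq : q hd <;>
      simp [List.filter_cons, List.countP_cons, hr, hq, ih]

-- B's sieve chain yields the priority-resolved counts (first match wins).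
theorem pvAltEq (results : List (String × List (String × List (List (String × String))))) :
    categorize_tests_alt results =
    (let cases := PySem.Dict.getD (PySem.Dict.ofList ((PySem.Dict.ofList results).getD "junit" [])) "test_cases" []
     let pairs := cases.map (fun tc =>
       (PySem.Str.lower ((PySem.Dict.ofList tc).getD "name" ""),
        PySem.Str.lower ((PySem.Dict.ofList tc).getD "classname" "")))
     [("unit", (pairs.countP pvCUnit : Int)),
      ("integration", (pairs.countP pvPInt : Int)),
      ("api", (pairs.countP pvCApi : Int)),
      ("performance", (pairs.countP pvCPerf : Int)),
      ("e2e", (pairs.countP pvCE2e : Int))]) := by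
  simp only [categorize_tests_alt, pvSieve]
  congr 1
  · congr 1
    rw [← List.countP_eq_length_filter, pvCountFilter, pvCountFilter, pvCountFilter]
    exact_mod_cast List.countP_congr (fun a _ => by
      simp [pvCUnit, pvPInt, pvPApi, pvPPerf, pvPE2e, Bool.and_assoc])
  congr 1
  · congr 1
    rw [← List.countP_eq_length_filter]
    exact_mod_cast List.countP_congr (fun a _ => by simp [pvPInt])
  congr 1
  · congr 1
    rw [← List.countP_eq_length_filter, pvCountFilter]
    exact_mod_cast List.countP_congr (fun a _ => by
      simp [pvCApi, pvPInt, pvPApi, Bool.and_assoc])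
  congr 1
  · congr 1
    rw [← List.countP_eq_length_filter, pvCountFilter, pvCountFilter]
    exact_mod_cast List.countP_congr (fun a _ => by
      simp [pvCPerf, pvPInt, pvPApi, pvPPerf, Bool.and_assoc])
  · congr 1
    congr 1
    rw [← List.countP_eq_length_filter, pvCountFilter, pvCountFilter, pvCountFilter]
    exact_mod_cast List.countP_congr (fun a _ => by
      simp [pvCE2e, pvPInt, pvPApi, pvPPerf, pvPE2e, Bool.and_assoc])

-- items of the literal 5-key dict.
theorem pvItems (u i a p e : Int) :
    (PySem.Dict.ofList
      [("unit", u), ("integration", i), ("api", a), ("performance", p), ("e2e", e)]).items =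
    [("unit", u), ("integration", i), ("api", a), ("performance", p), ("e2e", e)] := by
  simp [PySem.Dict.ofList, PySem.Dict.insert, PySem.Dict.items, PySem.Dict.contains,
    PySem.Dict.empty, PySem.Dict.update]

-- ===== VERDICT (by name: the statement is the Claim_ definition above) =====
theorem categorize_tests_spec : Claim_equal_categorize_tests := by
  intro results _
  unfold Spec_categorize_tests
  rw [pvAltEq]
  unfold categorize_tests
  have hfold : ∀ (cases : List (List (String × String))),
      cases.foldl (fun cats test_case =>
        let name := PySem.Str.lower ((PySem.Dict.ofList test_case).getD "name" "")
        let classname := PySem.Str.lower ((PySem.Dict.ofList test_case).getD "classname" "")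
        if PySem.Str.isIn "integration" name || PySem.Str.isIn "integration" classname then
          cats.modify "integration" 0 (· + 1)
        else if PySem.Str.isIn "api" name || PySem.Str.isIn "api" classname then
          cats.modify "api" 0 (· + 1)
        else if PySem.Str.isIn "performance" name || PySem.Str.isIn "benchmark" name then
          cats.modify "performance" 0 (· + 1)
        else if PySem.Str.isIn "e2e" name || PySem.Str.isIn "end_to_end" name then
          cats.modify "e2e" 0 (· + 1)
        else
          cats.modify "unit" 0 (· + 1))
        (PySem.Dict.ofList [("unit", 0), ("integration", 0), ("api", 0), ("performance", 0), ("e2e", 0)]) =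
      (cases.map (fun tc =>
        (PySem.Str.lower ((PySem.Dict.ofList tc).getD "name" ""),
         PySem.Str.lower ((PySem.Dict.ofList tc).getD "classname" "")))).foldl pvStep
        (PySem.Dict.ofList [("unit", 0), ("integration", 0), ("api", 0), ("performance", 0), ("e2e", 0)]) := by
    intro cases
    rw [List.foldl_map]
    rfl
  simp only []
  rw [hfold, pvFoldA, pvItems]
  simp
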